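-- pv_equiv track=rewrite | github.com/BrettDutka/Python-Programs-Projects | Functions, Math Operations, Conditionals, and Loops/Math problem solving.py | equal_remove
-- ===== SOURCE A (Python) =====
-- def equal_remove(x,y,lst):
--     tmp = lst
--     def cnt_occurs(x, lst):
--         count = 0
--         for t in lst:
--             if t == x:
--                 count += 1
--         return count
--
--     x_c, y_c = cnt_occurs(x, lst), cnt_occurs(y,lst)
--
--     def re_k(x,cnt,lst):
--         new_lst = []
--         removed = 0
--         for t in lst:
--             if t == x and removed < cnt:
--                 removed += 1
--             else:
--                 new_lst.append(t)
--         return new_lst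
--
--     if x_c < y_c:
--         tmp = re_k(y, y_c-x_c, tmp)
--     elif x_c > y_c:
--         tmp = re_k(x,x_c - y_c, tmp)
--
--     return tmp
-- ===== SOURCE B (Python) =====
-- def equal_remove(x, y, lst):
--     x_c = lst.count(x)
--     y_c = lst.count(y)
--     if x_c == y_c:
--         return lst
--     if x_c > y_c:
--         v, d = x, x_c - y_c
--     else:
--         v, d = y, y_c - x_c
--     tmp = list(lst)
--     for _ in range(d):
--         tmp.remove(v)
--     return tmp
-- ===== Notes on version B (the rewrite author's own statement) =====
-- stated objective: idiomatic
-- what changed: B counts with list.count and, when counts differ, repeatedly calls list.remove on a copy to delete the first d occurrences, instead of A's hand-rolled counting loop and single filtering pass with a 'removed' counter.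
import Mathlib
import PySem

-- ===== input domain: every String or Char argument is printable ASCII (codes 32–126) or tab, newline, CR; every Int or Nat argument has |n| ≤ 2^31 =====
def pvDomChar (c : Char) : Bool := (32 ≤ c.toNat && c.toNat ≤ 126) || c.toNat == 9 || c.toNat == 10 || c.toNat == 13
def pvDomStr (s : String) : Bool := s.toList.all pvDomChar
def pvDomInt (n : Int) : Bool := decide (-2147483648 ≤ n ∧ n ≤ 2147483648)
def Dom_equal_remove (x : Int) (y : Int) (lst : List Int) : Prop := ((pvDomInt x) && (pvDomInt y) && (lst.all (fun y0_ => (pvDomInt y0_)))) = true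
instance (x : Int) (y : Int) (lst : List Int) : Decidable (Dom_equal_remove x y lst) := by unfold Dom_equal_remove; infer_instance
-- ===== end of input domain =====

-- B: count with list.count and, when counts differ, repeatedly list.remove the
-- surplus value's first occurrence on a copy, instead of A's counting loop and
-- single filtering pass with a 'removed' counter (idiomatic; same return value).

-- ===== PORT A =====
-- cnt_occurs: loop accumulating count
def cntOccurs (x : Int) (lst : List Int) : Int :=
  lst.foldl (fun count t => if t = x then count + 1 else count) 0

-- re_k: single pass, skip matches while removed < cnt
def reKAux (x cnt removed : Int) : List Int → List Int
  | [] => []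
  | t :: ts =>
    if t = x ∧ removed < cnt then reKAux x cnt (removed + 1) ts
    else t :: reKAux x cnt removed ts

def re_k (x cnt : Int) (lst : List Int) : List Int := reKAux x cnt 0 lst

def equal_remove (x : Int) (y : Int) (lst : List Int) : List Int :=
  let tmp := lst
  let x_c := cntOccurs x lst
  let y_c := cntOccurs y lst
  if x_c < y_c then re_k y (y_c - x_c) tmp
  else if x_c > y_c then re_k x (x_c - y_c) tmp
  else tmp

-- ===== PORT B =====
-- 'for _ in range(d): tmp.remove(v)' — remove never raises here (d ≤ count v tmp)
def removeN (v : Int) : Nat → List Int → List Int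
  | 0, l => l
  | n + 1, l => removeN v n ((PySem.List.remove? l v).getD l)

def equal_remove_alt (x : Int) (y : Int) (lst : List Int) : List Int :=
  let x_c : Int := PySem.List.count lst x
  let y_c : Int := PySem.List.count lst y
  if x_c = y_c then lst
  else
    let v := if x_c > y_c then x else y
    let d := if x_c > y_c then x_c - y_c else y_c - x_c
    removeN v d.toNat lst

-- ===== PRECONDITION & SPEC =====
def Spec_equal_remove (x : Int) (y : Int) (lst : List Int) (out : List Int) : Prop := out = equal_remove_alt x y lst
instance (x : Int) (y : Int) (lst : List Int) (out : List Int) : Decidable (Spec_equal_remove x y lst out) := by unfold Spec_equal_remove; infer_instance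

-- ===== CLAIM (what is proved, stated in full; the proofs are below) =====
def Claim_equal_equal_remove : Prop := ∀ (x : Int) (y : Int) (lst : List Int), Dom_equal_remove x y lst → Spec_equal_remove x y lst (equal_remove x y lst)

-- ===== LEMMAS AND PROOFS =====

-- proof-side normal form: one pass skipping the first k occurrences of x
def skip (x k : Int) : List Int → List Int
  | [] => []
  | t :: ts => if t = x ∧ 0 < k then skip x (k - 1) ts else t :: skip x k ts

theorem reKAux_eq_skip (x cnt removed : Int) (l : List Int) :
    reKAux x cnt removed l = skip x (cnt - removed) l := by
  induction l generalizing removed with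
  | nil => rfl
  | cons t ts ih =>
    simp only [reKAux, skip]
    by_cases h : t = x
    · by_cases hk : removed < cnt
      · rw [if_pos ⟨h, hk⟩, if_pos ⟨h, by omega⟩, ih]
        congr 1; omega
      · rw [if_neg (by tauto), if_neg (by rintro ⟨_, hc⟩; omega), ih]
    · rw [if_neg (by tauto), if_neg (by tauto), ih]

theorem skip_nonpos (x k : Int) (l : List Int) (hk : k ≤ 0) : skip x k l = l := by
  induction l with
  | nil => rfl
  | cons t ts ih => simp only [skip]; rw [if_neg (by rintro ⟨_, hk'⟩; omega), ih]

theorem skip_succ (v : Int) (n : Nat) (l : List Int) :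
    skip v ((n : Int) + 1) l = skip v (n : Int) ((PySem.List.remove? l v).getD l) := by
  induction l with
  | nil => rfl
  | cons t ts ih =>
    by_cases h : t = v
    · subst h
      rw [PySem.List.remove?_cons_self, Option.getD_some]
      show (if t = t ∧ 0 < (n : Int) + 1 then skip t ((n : Int) + 1 - 1) ts
            else t :: skip t ((n : Int) + 1) ts) = skip t (n : Int) ts
      rw [if_pos ⟨rfl, by omega⟩]
      congr 1; omega
    · rw [PySem.List.remove?_cons_of_ne ts h]
      simp only [skip]
      rw [if_neg (by tauto)]
      cases hr : PySem.List.remove? ts v with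
      | none =>
        simp only [Option.map_none, Option.getD_none, skip]
        rw [if_neg (by tauto), ih, hr, Option.getD_none]
      | some ts' =>
        simp only [Option.map_some, Option.getD_some, skip]
        rw [if_neg (by tauto), ih, hr, Option.getD_some]

theorem removeN_eq_skip (v : Int) (n : Nat) (l : List Int) :
    removeN v n l = skip v (n : Int) l := by
  induction n generalizing l with
  | zero => simp [removeN, skip_nonpos v 0 l le_rfl]
  | succ m ih =>
    simp only [removeN]
    rw [ih, ← skip_succ]
    norm_cast

theorem cntOccurs_eq_count (x : Int) (l : List Int) :
    cntOccurs x l = (PySem.List.count l x : Int) := by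
  rw [PySem.List.count_eq]
  unfold cntOccurs
  suffices h : ∀ (c : Int), l.foldl (fun count t => if t = x then count + 1 else count) c
      = c + (l.count x : Int) by
    simpa using h 0
  induction l with
  | nil => simp
  | cons t ts ih =>
    intro c
    simp only [List.foldl_cons, List.count_cons, ih]
    by_cases h : t = x
    · simp [h]; ring
    · simp [h, beq_iff_eq]

-- ===== VERDICT (by name: the statement is the Claim_ definition above) =====
theorem equal_remove_spec : Claim_equal_equal_remove := by
  intro x y lst _
  unfold Spec_equal_remove equal_remove equal_remove_alt
  simp only [cntOccurs_eq_count]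
  set xc : Int := (PySem.List.count lst x : Int) with hxc
  set yc : Int := (PySem.List.count lst y : Int) with hyc
  by_cases hlt : xc < yc
  · have hv : (if xc > yc then x else y) = y := if_neg (by omega)
    have hd : (if xc > yc then xc - yc else yc - xc) = yc - xc := if_neg (by omega)
    rw [if_pos hlt, if_neg (by omega), re_k, reKAux_eq_skip, removeN_eq_skip,
      hv, hd, Int.toNat_of_nonneg (by omega)]
    congr 1; omega
  · by_cases hgt : xc > yc
    · have hv : (if xc > yc then x else y) = x := if_pos hgt
      have hd : (if xc > yc then xc - yc else yc - xc) = xc - yc := if_pos hgt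
      rw [if_neg hlt, if_pos hgt, if_neg (by omega), re_k, reKAux_eq_skip,
        removeN_eq_skip, hv, hd, Int.toNat_of_nonneg (by omega)]
      congr 1; omega
    · rw [if_neg hlt, if_neg hgt, if_pos (by omega)]
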